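-- pv_equiv track=rewrite | github.com/Ashwin-8921/PYTHON | 06_Strings/worksheet 2/P47.py | remove_redundant_substrings
-- ===== SOURCE A (Python) =====
-- def remove_redundant_substrings(strings):
--     result = []
--     for word in strings:
--         n = len(word)
--         for i in range(1, n // 2 + 1):
--             pattern = word[:i]
--             if pattern * (n // i) == word:
--                 result.append(pattern)
--                 break
--         else:
--             result.append(word)
--     return result
-- ===== SOURCE B (Python) =====
-- def remove_redundant_substrings(strings):
--     result = []
--     for word in strings:
--         p = (word + word).find(word, 1)
--         result.append(word if p == -1 else word[:p])
--     return result
-- ===== Notes on version B (the rewrite author's own statement) =====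
-- stated objective: faster
-- what changed: Replaces A's per-word trial loop (try every prefix length i up to n//2 and compare pattern*(n//i) with the word) by the classic smallest-period trick: p = (w+w).find(w, 1) gives the least period directly, and the word is replaced by w[:p].
import Mathlib
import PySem

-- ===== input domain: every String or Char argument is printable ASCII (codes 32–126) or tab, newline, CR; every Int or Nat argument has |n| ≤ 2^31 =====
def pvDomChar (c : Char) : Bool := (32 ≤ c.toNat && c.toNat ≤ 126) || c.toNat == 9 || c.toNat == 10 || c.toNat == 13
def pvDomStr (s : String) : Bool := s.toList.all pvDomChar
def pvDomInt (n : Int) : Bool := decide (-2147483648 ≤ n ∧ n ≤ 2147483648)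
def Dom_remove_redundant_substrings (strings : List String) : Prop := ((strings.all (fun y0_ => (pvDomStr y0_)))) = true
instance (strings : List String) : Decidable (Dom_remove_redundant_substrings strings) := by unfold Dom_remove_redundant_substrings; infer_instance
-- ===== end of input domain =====

-- B computes each word's smallest repeating unit via the smallest-period trick p = (w+w).find(w,1)
-- instead of A's trial loop over all prefix lengths; measurably faster (asymptotically better per word).


-- ===== PORT A =====
-- `pattern * k` (Python string repetition)
def pvRep (p : List Char) (k : Nat) : List Char := (List.replicate k p).flatten

-- the inner `for i in range(1, n//2+1): … break / else:` loop of A, scanning candidate lengths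
def pvScanA (l : List Char) (n : Nat) : List Nat → Option (List Char)
  | [] => none
  | i :: rest => if pvRep (l.take i) (n / i) = l then some (l.take i) else pvScanA l n rest

def remove_redundant_substrings (strings : List String) : List String :=
  strings.map (fun word =>
    let l := word.toList
    let n := l.length
    match pvScanA l n (List.range' 1 (n / 2)) with
    | some pat => String.ofList pat
    | none => word)

-- ===== PORT B =====
def remove_redundant_substrings_alt (strings : List String) : List String :=
  strings.map (fun word =>
    let p := PySem.Str.findFrom (word ++ word) word 1 none
    if p == -1 then word else PySem.Str.slice word none (some p))

-- ===== PRECONDITION & SPEC =====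
def Spec_remove_redundant_substrings (strings : List String) (out : List String) : Prop := out = remove_redundant_substrings_alt strings
instance (strings : List String) (out : List String) : Decidable (Spec_remove_redundant_substrings strings out) := by unfold Spec_remove_redundant_substrings; infer_instance

-- ===== CLAIM (what is proved, stated in full; the proofs are below) =====
def Claim_equal_remove_redundant_substrings : Prop := ∀ (strings : List String), Dom_remove_redundant_substrings strings → Spec_remove_redundant_substrings strings (remove_redundant_substrings strings)

-- ===== LEMMAS AND PROOFS =====

-- `l` occurs in `l ++ l` at offset `j ≤ |l|` exactly when rotating `l` by `j` fixes it
theorem pv_prefix_drop_iff (l : List Char) (j : Nat) (hj : j ≤ l.length) :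
    l <+: (l ++ l).drop j ↔ l.rotate j = l := by
  rw [List.drop_append_of_le_length hj, List.rotate_eq_drop_append_take hj]
  constructor
  · intro h
    have he := List.prefix_iff_eq_take.mp h
    rw [List.take_append] at he
    have h1 : (l.drop j).length = l.length - j := by simp
    rw [h1, List.take_of_length_le (by omega)] at he
    have h2 : l.length - (l.length - j) = j := by omega
    rw [h2] at he
    exact he.symm
  · intro h
    refine ⟨l.drop j, ?_⟩
    calc l ++ l.drop j = (l.drop j ++ l.take j) ++ l.drop j := by rw [h]
      _ = l.drop j ++ (l.take j ++ l.drop j) := by rw [List.append_assoc]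
      _ = l.drop j ++ l := by rw [List.take_append_drop]

theorem pv_rot_sub (l : List Char) (a b : Nat) (hab : a ≤ b)
    (ha : l.rotate a = l) (hb : l.rotate b = l) : l.rotate (b - a) = l := by
  have h := List.rotate_rotate l a (b - a)
  rw [ha, Nat.add_sub_cancel' hab, hb] at h
  exact h

theorem pv_rot_dvd_aux (l : List Char) (p : Nat) (hp : 1 ≤ p) (hrot : l.rotate p = l)
    (hmin : ∀ i, 1 ≤ i → i < p → l.rotate i ≠ l) :
    ∀ m, l.rotate m = l → p ∣ m := by
  intro m
  induction m using Nat.strong_induction_on with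
  | _ m ih =>
    intro hm
    rcases Nat.lt_or_ge m p with h | h
    · rcases Nat.eq_zero_or_pos m with rfl | hm1
      · exact Dvd.intro 0 rfl
      · exact absurd hm (hmin m hm1 h)
    · have h1 : l.rotate (m - p) = l := pv_rot_sub l p m h hrot hm
      have h2 : p ∣ m - p := ih (m - p) (by omega) h1
      have h3 := Nat.dvd_add h2 (dvd_refl p)
      rwa [Nat.sub_add_cancel h] at h3

theorem pv_min_rot_dvd (l : List Char) (p : Nat) (hp : 1 ≤ p) (hrot : l.rotate p = l)
    (hmin : ∀ i, 1 ≤ i → i < p → l.rotate i ≠ l) : p ∣ l.length :=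
  pv_rot_dvd_aux l p hp hrot hmin l.length (List.rotate_length l)

theorem pv_rep_comm (u : List Char) (k : Nat) : pvRep u k ++ u = u ++ pvRep u k := by
  induction k with
  | zero => simp [pvRep]
  | succ k ih =>
    simp only [pvRep, List.replicate_succ, List.flatten_cons] at ih ⊢
    rw [List.append_assoc, ih]

theorem pv_rot_pow : ∀ (n : Nat) (l : List Char) (p : Nat), l.length = n → 1 ≤ p →
    p ∣ l.length → l.rotate p = l → pvRep (l.take p) (l.length / p) = l := by
  intro n
  induction n using Nat.strong_induction_on with
  | _ n ih =>
    intro l p hn hp hdvd hrot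
    rcases Nat.eq_zero_or_pos l.length with h0 | h1
    · have : l = [] := List.eq_nil_of_length_eq_zero h0
      subst this; simp [pvRep]
    · have hple : p ≤ l.length := Nat.le_of_dvd h1 hdvd
      rw [List.rotate_eq_drop_append_take hple] at hrot
      rcases Nat.lt_or_ge p l.length with hlt | hge
      · -- p < n : recurse on v := l.drop p
        set u := l.take p with hu
        set v := l.drop p with hv
        have hvlen : v.length = l.length - p := by simp [hv]
        have hdvd' : p ∣ v.length := by
          rw [hvlen]; exact Nat.dvd_sub hdvd (dvd_refl p)
        have hvpos : 1 ≤ v.length := by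
          rw [hvlen]
          rcases hdvd with ⟨c, hc⟩
          have : 2 ≤ c := by nlinarith
          omega
        have hpv : p ≤ v.length := Nat.le_of_dvd hvpos hdvd'
        -- v.take p = u
        have htk : v.take p = u := by
          have := congrArg (List.take p) hrot
          rw [List.take_append_of_le_length hpv] at this
          rw [this, hu]
        -- v.rotate p = v
        have hrotv : v.rotate p = v := by
          have := congrArg (List.drop p) hrot
          rw [List.drop_append_of_le_length hpv, hv, List.drop_drop] at this
          rw [List.rotate_eq_drop_append_take hpv, htk, hv, List.drop_drop]
          rw [Nat.add_comm] at this ⊢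
          exact this
        have hih := ih v.length (by omega) v p rfl hp hdvd' hrotv
        rw [htk] at hih
        have hdiv : l.length / p = v.length / p + 1 := by
          rw [hvlen]
          rcases hdvd with ⟨c, hc⟩
          rw [hc]
          have : p * c - p = p * (c - 1) := by
            rw [Nat.mul_sub, Nat.mul_one]
          rw [this, Nat.mul_div_cancel_left _ (by omega), Nat.mul_div_cancel_left _ (by omega)]
          have : 1 ≤ c := by nlinarith
          omega
        rw [hdiv]
        simp only [pvRep, List.replicate_succ, List.flatten_cons]
        show u ++ pvRep u (v.length / p) = l
        rw [hih, hu, hv, List.take_append_drop]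
      · -- p = n
        have hpn : p = l.length := le_antisymm hple hge
        rw [hpn, Nat.div_self h1]
        simp [pvRep, List.take_of_length_le (le_refl _)]

theorem pv_cond_rot (l : List Char) (i : Nat) (h1 : 1 ≤ i) (h2 : i ≤ l.length)
    (hc : pvRep (l.take i) (l.length / i) = l) : i ∣ l.length ∧ l.rotate i = l := by
  have hlen : ((List.replicate (l.length / i) (l.take i)).flatten).length = (l.length / i) * i := by
    simp [List.length_take, Nat.min_eq_left h2, Nat.mul_comm]
  have hdvd : i ∣ l.length := by
    have := congrArg List.length hc
    rw [pvRep] at this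
    rw [hlen] at this
    exact Dvd.intro_left _ this
  refine ⟨hdvd, ?_⟩
  have hn1 : 1 ≤ l.length := le_trans h1 h2
  have hk : 1 ≤ l.length / i := Nat.one_le_div_iff (by omega) |>.mpr h2
  set k := l.length / i with hkdef
  set u := l.take i with hu
  have hl : l = u ++ pvRep u (k - 1) := by
    conv_lhs => rw [← hc]
    have : k = (k - 1) + 1 := by omega
    rw [this]
    simp [pvRep, List.replicate_succ]
  have hulen : u.length = i := by simp [hu, Nat.min_eq_left h2]
  rw [List.rotate_eq_drop_append_take h2]
  have hdrop : l.drop i = pvRep u (k - 1) := by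
    conv_lhs => rw [hl]
    rw [← hulen, List.drop_left]
  have htake : l.take i = u := hu.symm ▸ rfl
  rw [hdrop, htake, pv_rep_comm]
  exact hl.symm

theorem pv_scanA_none (l : List Char) (n : Nat) (is : List Nat)
    (h : ∀ i ∈ is, pvRep (l.take i) (n / i) ≠ l) : pvScanA l n is = none := by
  induction is with
  | nil => rfl
  | cons i rest ih =>
    simp only [pvScanA]
    rw [if_neg (h i (List.mem_cons_self))]
    exact ih (fun j hj => h j (List.mem_cons_of_mem i hj))

theorem pv_scanA_hit (l : List Char) (n : Nat) : ∀ (b a p : Nat), a ≤ p → p < a + b →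
    pvRep (l.take p) (n / p) = l → (∀ i, a ≤ i → i < p → pvRep (l.take i) (n / i) ≠ l) →
    pvScanA l n (List.range' a b) = some (l.take p) := by
  intro b
  induction b with
  | zero => intro a p h1 h2; omega
  | succ b ih =>
    intro a p h1 h2 hc hmin
    rw [List.range'_succ]
    simp only [pvScanA]
    rcases Nat.eq_or_lt_of_le h1 with rfl | hlt
    · rw [if_pos hc]
    · rw [if_neg (hmin a (le_refl a) hlt)]
      exact ih (a + 1) p hlt (by omega) hc (fun i hi hip => hmin i (by omega) hip)

-- the per-word equality
theorem pv_word_eq (word : String) :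
    (match pvScanA word.toList word.toList.length (List.range' 1 (word.toList.length / 2)) with
     | some pat => String.ofList pat
     | none => word) =
    (let p := PySem.Str.findFrom (word ++ word) word 1 none
     if p == -1 then word else PySem.Str.slice word none (some p)) := by
  set l := word.toList with hl
  have hff : PySem.Str.findFrom (word ++ word) word 1 none
      = PySem.Chars.findFrom (l ++ l) l 1 none := by simp [hl]
  rcases Nat.eq_zero_or_pos l.length with h0 | h1
  · -- empty word: both sides return the word itself
    have hnil : l = [] := List.eq_nil_of_length_eq_zero h0
    have hc0 : PySem.Chars.findFrom ([]:List Char) [] 1 none = -1 := by decide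
    rw [hff, hnil]
    simp [pvScanA, hc0]
  · -- nonempty word
    have hk : (1:Nat) ≤ (l ++ l).length := by simp; omega
    have hne : PySem.Chars.findFrom (l ++ l) l 1 none ≠ -1 := by
      have hiff := PySem.Chars.findFrom_natCast_eq_neg_one_iff (l ++ l) l 1 hk
      simp only [Nat.cast_one] at hiff
      intro hEq
      rw [hiff, List.drop_append_of_le_length h1] at hEq
      exact hEq (List.suffix_append _ _).isInfix
    obtain ⟨hge1, hpre, hmin⟩ := PySem.Chars.findFrom_natCast_spec (l ++ l) l 1 hk hne
    set f := PySem.Chars.findFrom (l ++ l) l 1 none with hfdef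
    simp only [Nat.cast_one] at hge1 hmin
    set p := f.toNat with hpdef
    have hp1 : 1 ≤ p := by omega
    have hfp : f = (p : Int) := by omega
    have hpn : p ≤ l.length := by
      by_contra hgt
      have hdl : List.drop l.length (l ++ l) = l := by simp
      exact hmin l.length h1 (by omega) (by rw [hdl])
    have hrotp : l.rotate p = l := (pv_prefix_drop_iff l p hpn).mp hpre
    have hminrot : ∀ i, 1 ≤ i → i < p → l.rotate i ≠ l := fun i hi hip hrot =>
      hmin i hi hip ((pv_prefix_drop_iff l i (by omega)).mpr hrot)
    have hdvd : p ∣ l.length := pv_min_rot_dvd l p hp1 hrotp hminrot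
    -- B's word reduces to word[:p]
    have hBne : (f == -1) = false := by
      rw [beq_eq_false_iff_ne]; exact hne
    have hBlist : (PySem.Str.slice word none (some f)).toList = l.take p := by
      rw [hfp]
      simp [PySem.Str.toList_slice, PySem.Chars.slice_eq_listSlice, PySem.List.slice_to_natCast, hl]
    have hB : PySem.Str.slice word none (some f) = String.ofList (l.take p) := by
      have h := congrArg String.ofList hBlist
      rwa [String.ofList_toList] at h
    rcases Nat.lt_or_ge (l.length / 2) p with hhalf | hhalf
    · -- the least period exceeds n/2, so it must be n itself: both return the word
      have hpeq : p = l.length := by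
        rcases hdvd with ⟨c, hc⟩
        rcases Nat.lt_or_ge c 2 with hc2 | hc2
        · interval_cases c <;> omega
        · exfalso
          have h2p : p * 2 ≤ l.length := by
            calc p * 2 ≤ p * c := Nat.mul_le_mul_left p hc2
              _ = l.length := hc.symm
          have := (Nat.le_div_iff_mul_le (by omega)).mpr h2p
          omega
      have hscan : pvScanA l l.length (List.range' 1 (l.length / 2)) = none := by
        refine pv_scanA_none l l.length _ ?_
        intro i hi hc
        rw [List.mem_range'_1] at hi
        exact hminrot i hi.1 (by omega) (pv_cond_rot l i hi.1 (by omega) hc).2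
      have hBw : String.ofList (l.take p) = word := by
        rw [hpeq, List.take_length, hl, String.ofList_toList]
      rw [hscan, hff]
      simp [hBne, hB, hBw]
    · -- the period fits in A's scan range: both return the repeating unit
      have hcond : pvRep (l.take p) (l.length / p) = l :=
        pv_rot_pow l.length l p rfl hp1 hdvd hrotp
      have hscan : pvScanA l l.length (List.range' 1 (l.length / 2)) = some (l.take p) := by
        refine pv_scanA_hit l l.length (l.length / 2) 1 p hp1 (by omega) hcond ?_
        intro i hi hip hc
        exact hminrot i hi hip (pv_cond_rot l i hi (by omega) hc).2
      rw [hscan, hff]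
      simp [hBne, hB]

-- ===== VERDICT (by name: the statement is the Claim_ definition above) =====
theorem remove_redundant_substrings_spec : Claim_equal_remove_redundant_substrings := by
  intro strings _
  unfold Spec_remove_redundant_substrings remove_redundant_substrings remove_redundant_substrings_alt
  exact List.map_congr_left (fun w _ => pv_word_eq w)
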